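-- pv_equiv track=rewrite | github.com/onetimesecret/onetimesecret | locales/scripts/tasks/create.py | group_keys_by_level
-- ===== SOURCE A (Python) =====
-- from collections import defaultdict
--
-- def get_parent_level(key_path: str) -> str:
--     """Extract the parent level from a full key path.
--
--     Args:
--         key_path: Full dot-notation path (e.g., 'web.COMMON.buttons.submit')
--
--     Returns:
--         Parent level path (e.g., 'web.COMMON.buttons')
--     """
--     parts = key_path.rsplit(".", 1)
--     return parts[0] if len(parts) > 1 else ""
--
-- def get_leaf_key(key_path: str) -> str:
--     """Extract the leaf key name from a full key path.
--
--     Args: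
--         key_path: Full dot-notation path (e.g., 'web.COMMON.buttons.submit')
--
--     Returns:
--         Leaf key name (e.g., 'submit')
--     """
--     parts = key_path.rsplit(".", 1)
--     return parts[-1]
--
-- def group_keys_by_level(
--     keys: dict[str, str]
-- ) -> dict[str, dict[str, str]]:
--     """Group keys by their parent level.
--
--     Args:
--         keys: Dictionary mapping full key paths to English text.
--
--     Returns:
--         Dictionary mapping level_path to {leaf_key: source}.
--     """
--     levels: dict[str, dict[str, str]] = defaultdict(dict)
--     for key_path, source in keys.items():
--         level_path = get_parent_level(key_path)
--         leaf_key = get_leaf_key(key_path)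
--         levels[level_path][leaf_key] = source
--     return dict(levels)
-- ===== SOURCE B (Python) =====
-- def get_parent_level(key_path: str) -> str:
--     parts = key_path.rsplit(".", 1)
--     return parts[0] if len(parts) > 1 else ""
--
--
-- def get_leaf_key(key_path: str) -> str:
--     parts = key_path.rsplit(".", 1)
--     return parts[-1]
--
--
-- def group_keys_by_level(
--     keys: dict[str, str]
-- ) -> dict[str, dict[str, str]]:
--     """Group keys by their parent level: first list the distinct parent
--     levels in order of first appearance, then build each group by one
--     filtering comprehension over the items."""
--     parents = list(dict.fromkeys(get_parent_level(k) for k in keys))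
--     return {
--         p: {get_leaf_key(k): v for k, v in keys.items() if get_parent_level(k) == p}
--         for p in parents
--     }
-- ===== Notes on version B (the rewrite author's own statement) =====
-- stated objective: idiomatic
-- what changed: Replaces the incremental defaultdict accumulation with a two-phase pass: dedup the parent levels in first-appearance order, then build each group's inner dict by a filtering comprehension over the items.
import Mathlib
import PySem

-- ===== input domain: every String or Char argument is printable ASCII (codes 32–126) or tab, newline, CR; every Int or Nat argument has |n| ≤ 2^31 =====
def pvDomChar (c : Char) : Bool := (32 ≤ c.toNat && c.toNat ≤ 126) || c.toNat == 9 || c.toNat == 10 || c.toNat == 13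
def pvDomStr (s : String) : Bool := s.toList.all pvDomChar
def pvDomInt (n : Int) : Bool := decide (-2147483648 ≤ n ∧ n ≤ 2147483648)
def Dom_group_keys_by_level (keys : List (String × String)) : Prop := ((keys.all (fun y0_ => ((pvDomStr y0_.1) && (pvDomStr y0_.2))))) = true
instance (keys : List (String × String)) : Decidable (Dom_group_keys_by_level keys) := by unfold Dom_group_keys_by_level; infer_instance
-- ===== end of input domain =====

-- B groups by listing the distinct parent levels first and then filtering the items per parent,
-- instead of A's incremental defaultdict accumulation; objective: more idiomatic, same result.

-- ===== PORT A =====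
-- s.rsplit(".", 1): 'some (before, after)' splits at the LAST '.', 'none' = no '.' present (exact on all inputs)
def pvRsplitDot (cs : List Char) : Option (List Char × List Char) :=
  match cs with
  | [] => none
  | c :: rest =>
    match pvRsplitDot rest with
    | some (a, b) => some (c :: a, b)
    | none => if c = '.' then some ([], rest) else none

def get_parent_level (key_path : String) : String :=
  match pvRsplitDot key_path.toList with
  | some (a, _) => String.ofList a
  | none => ""

def get_leaf_key (key_path : String) : String :=
  match pvRsplitDot key_path.toList with
  | some (_, b) => String.ofList b
  | none => key_path

def group_keys_by_level (keys : List (String × String)) : List (String × List (String × String)) :=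
  ((keys.foldl
      (fun (d : PySem.Dict String (PySem.Dict String String)) q =>
        d.modify (get_parent_level q.1) PySem.Dict.empty
          (fun inner => inner.insert (get_leaf_key q.1) q.2))
      PySem.Dict.empty).items).map (fun e => (e.1, e.2.items))

-- ===== PORT B =====
def group_keys_by_level_alt (keys : List (String × String)) : List (String × List (String × String)) :=
  (PySem.List.dedup (keys.map (fun q => get_parent_level q.1))).map (fun p =>
    (p, ((keys.filter (fun q => get_parent_level q.1 == p)).foldl
          (fun (d : PySem.Dict String String) q => d.insert (get_leaf_key q.1) q.2)
          PySem.Dict.empty).items))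

-- ===== PRECONDITION & SPEC =====
def Spec_group_keys_by_level (keys : List (String × String)) (out : List (String × List (String × String))) : Prop := out = group_keys_by_level_alt keys
instance (keys : List (String × String)) (out : List (String × List (String × String))) : Decidable (Spec_group_keys_by_level keys out) := by unfold Spec_group_keys_by_level; infer_instance

-- ===== CLAIM (what is proved, stated in full; the proofs are below) =====
def Claim_equal_group_keys_by_level : Prop := ∀ (keys : List (String × String)), Dom_group_keys_by_level keys → Spec_group_keys_by_level keys (group_keys_by_level keys)

-- ===== LEMMAS AND PROOFS =====

-- A's accumulating loop, read off at one parent level p: it is exactly B's inner loop over the p-filtered items.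
lemma getD_fold_modify_insert (l : List (String × String))
    (d : PySem.Dict String (PySem.Dict String String)) (p : String) :
    (l.foldl
      (fun (d : PySem.Dict String (PySem.Dict String String)) q =>
        d.modify (get_parent_level q.1) PySem.Dict.empty
          (fun inner => inner.insert (get_leaf_key q.1) q.2))
      d).getD p PySem.Dict.empty
    = (l.filter (fun q => get_parent_level q.1 == p)).foldl
        (fun (inner : PySem.Dict String String) q => inner.insert (get_leaf_key q.1) q.2)
        (d.getD p PySem.Dict.empty) := by
  induction l generalizing d with
  | nil => rfl
  | cons q l ih =>
    simp only [List.foldl_cons, List.filter_cons]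
    by_cases h : get_parent_level q.1 = p
    · simp [h, ih]
    · have : (get_parent_level q.1 == p) = false := by simp [h]
      simp [this, ih, PySem.Dict.getD_modify, Ne.symm h]

-- ===== VERDICT (by name: the statement is the Claim_ definition above) =====

theorem group_keys_by_level_spec : Claim_equal_group_keys_by_level := by
  intro keys _
  unfold Spec_group_keys_by_level group_keys_by_level group_keys_by_level_alt
  have hkeys : (keys.foldl
      (fun (d : PySem.Dict String (PySem.Dict String String)) q =>
        d.modify (get_parent_level q.1) PySem.Dict.empty
          (fun inner => inner.insert (get_leaf_key q.1) q.2))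
      PySem.Dict.empty).keys
      = PySem.List.dedup (keys.map (fun q => get_parent_level q.1)) := by
    rw [PySem.Dict.keys_foldl_modify_key keys (fun q => get_parent_level q.1)
      PySem.Dict.empty (fun _ q inner => inner.insert (get_leaf_key q.1) q.2) PySem.Dict.empty]
    simp [PySem.Dict.keys_empty, PySem.Set.update_nil_left]
  have hnd := PySem.Dict.nodup_keys_foldl_modify_key keys (fun q => get_parent_level q.1)
      PySem.Dict.empty (fun _ q inner => inner.insert (get_leaf_key q.1) q.2) PySem.Dict.empty
      (by simp [PySem.Dict.keys_empty])
  rw [PySem.Dict.items_eq_map_keys _ hnd PySem.Dict.empty, hkeys, List.map_map]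
  apply List.map_congr_left
  intro p _
  simp only [Function.comp]
  rw [getD_fold_modify_insert]
  simp [PySem.Dict.getD_empty]
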